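-- pv_equiv track=rewrite | github.com/clemdcz/Crypto | Crypto/monge1.py | monge1
-- ===== SOURCE A (Python) =====
-- def monge1(mot):
--     """// ---------------- DEBUT EN TETE --------------------------------------//
-- // NOM :                    codage monge1                        //
-- //                                                                      //
-- // AUTEURS : E.chassagne B.balos C.da cruz E.bertrand                   //
-- //                                                                      //
-- // VERSION :    2.1                                  novembre 2020     //
-- // HISTORIQUE : Aucun                                                   //
-- //                                                                      //
-- // ENTREES :                                                            //
-- //    cap      texte en clair a codé                                    //                                                                      //                                                 //
-- // SORTIES :                                                            //
-- //    texte    le texte codé par monge1                         //                                                                      //                                                                      //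
-- // MODIFIEES :                                                          //
-- //                                                                      //
-- // LOCALES :                                                            //
-- //             alphabet et remplacement                                 //
-- //                                                                      //
-- // FONCTIONS APPELEES :                                                 //
-- //                                                                      //
-- // ALGO - REFERENCES :                                                  //
-- //                                                                      //
-- // ---------------- FIN EN TETE ----------------------------------------//
--
--     """
--     motclaire = list(mot)
--     longeur = len(motclaire)
--     ordre= []
--     motcode = []
--     moitier = int(longeur/2)
--     chifre = longeur
--     if longeur%2 == 1:
--         chifre = chifre -1
--         for i in range (0, moitier):
--             ordre.append(chifre)
--             chifre = chifre -2
--         for g in range (1, longeur+1, 2):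
--                 ordre.append(g)
--     else:
--         for i in range (0, moitier):
--             ordre.append(chifre)
--             chifre = chifre -2
--         for g in range (1, longeur+1, 2):
--                 ordre.append(g)
--     for k in range (0, longeur):
--         numero = ordre[k] -1
--         motcode.append(motclaire[numero])
--     textecode = "".join(motcode)
--     return textecode
-- ===== SOURCE B (Python) =====
-- def monge1(mot):
--     m = list(mot)
--     return "".join(m[1::2][::-1] + m[0::2])
-- ===== Notes on version B (the rewrite author's own statement) =====
-- stated objective: simpler
-- what changed: Replaces the two-phase construction of an `ordre` index array and the final index-mapping loop with direct slicing: the odd-position characters reversed followed by the even-position characters.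
import Mathlib
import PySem

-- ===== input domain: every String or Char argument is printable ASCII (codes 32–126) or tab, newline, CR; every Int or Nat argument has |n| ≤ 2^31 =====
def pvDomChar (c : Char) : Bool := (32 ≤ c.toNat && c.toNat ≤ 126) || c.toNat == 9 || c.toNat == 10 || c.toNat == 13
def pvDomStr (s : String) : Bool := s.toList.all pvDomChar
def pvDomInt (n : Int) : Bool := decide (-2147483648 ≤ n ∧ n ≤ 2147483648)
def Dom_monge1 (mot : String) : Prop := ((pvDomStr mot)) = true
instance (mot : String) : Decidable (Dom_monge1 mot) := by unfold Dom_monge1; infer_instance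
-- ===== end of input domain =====

-- B replaces A's two index-building loops and the final mapping loop by direct
-- slicing (odd-position characters reversed, then even-position characters); objective: simpler.

-- ===== PORT A =====
-- literal transliteration of A: build the `ordre` index list in two loops
-- (an if on parity, then a descending even-countdown loop and an ascending odd loop),
-- then map each 1-based index onto the characters.
def monge1 (mot : String) : String :=
  let motclaire : List Char := mot.toList
  let longeur : Int := motclaire.length
  let moitier : Int := PySem.Int.truncdiv longeur 2   -- int(longeur/2), exact here
  let chifre0 : Int := longeur
  let ordre : List Int :=
    if PySem.Int.mod longeur 2 = 1 then
      let chifre1 := chifre0 - 1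
      let st := (PySem.List.pyRange 0 moitier 1).foldl
        (fun (st : List Int × Int) _ => (st.1 ++ [st.2], st.2 - 2)) ([], chifre1)
      (PySem.List.pyRange 1 (longeur + 1) 2).foldl (fun acc g => acc ++ [g]) st.1
    else
      let st := (PySem.List.pyRange 0 moitier 1).foldl
        (fun (st : List Int × Int) _ => (st.1 ++ [st.2], st.2 - 2)) ([], chifre0)
      (PySem.List.pyRange 1 (longeur + 1) 2).foldl (fun acc g => acc ++ [g]) st.1
  let motcode : List Char :=
    (PySem.List.pyRange 0 longeur 1).foldl
      (fun acc k =>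
        let numero := PySem.List.pyGetD ordre k 0 - 1
        acc ++ [PySem.List.pyGetD motclaire numero ' ']) []
  String.ofList motcode

-- ===== PORT B =====
-- literal transliteration of B: "".join(m[1::2][::-1] + m[0::2])
def monge1_alt (mot : String) : String :=
  let m : List Char := mot.toList
  String.ofList
    (((PySem.List.slice? ((PySem.List.slice? m (some 1) none 2).getD []) none none (-1)).getD [])
      ++ (PySem.List.slice? m (some 0) none 2).getD [])

-- ===== PRECONDITION & SPEC =====
def Spec_monge1 (mot : String) (out : String) : Prop := out = monge1_alt mot
instance (mot : String) (out : String) : Decidable (Spec_monge1 mot out) := by unfold Spec_monge1; infer_instance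

-- ===== CLAIM (what is proved, stated in full; the proofs are below) =====
def Claim_equal_monge1 : Prop := ∀ (mot : String), Dom_monge1 mot → Spec_monge1 mot (monge1 mot)

-- ===== LEMMAS AND PROOFS =====

def takeEven {α : Type} : List α → List α
  | [] => []
  | [x] => [x]
  | x :: _ :: xs => x :: takeEven xs

theorem map_getD_even {α : Type} (xs : List α) (d : α) :
    (List.range ((xs.length + 1) / 2)).map (fun k => xs.getD (2 * k) d) = takeEven xs := by
  induction xs using takeEven.induct with
  | case1 => simp [takeEven]
  | case2 x => simp [takeEven]
  | case3 x y xs ih =>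
    have h : ((x :: y :: xs).length + 1) / 2 = (xs.length + 1) / 2 + 1 := by
      simp; omega
    rw [h, List.range_succ_eq_map, List.map_cons, List.map_map]
    simp only [takeEven, List.cons.injEq]
    refine ⟨rfl, ?_⟩
    rw [← ih]
    apply List.map_congr_left
    intro i _
    have h2 : 2 * (i + 1) = 2 * i + 2 := by ring
    show (x :: y :: xs).getD (2 * (i + 1)) d = xs.getD (2 * i) d
    rw [h2]; rfl

theorem slice2_even {α : Type} (xs : List α) (d : α) :
    PySem.List.slice? xs (some 0) none 2 = some (takeEven xs) := by
  rw [← map_getD_even xs d]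
  simp only [PySem.List.slice?, PySem.List.sliceIndices]
  norm_num
  have hc : ((if 0 < xs.length then (((xs.length:Int) + 2 - 1)/2).toNat else 0))
      = (xs.length + 1) / 2 := by split <;> omega
  rw [hc]
  rw [List.filterMap_congr (g := fun k => some (xs[2*k]?.getD d)) ?_]
  · simp
  intro k hk
  simp only [List.mem_range] at hk
  have hlt : 2 * k < xs.length := by omega
  rw [show ((2 * (k:Int)).toNat) = 2 * k by omega]
  simp [List.getElem?_eq_getElem hlt]

def takeOdd {α : Type} : List α → List α
  | [] => []
  | [_] => []
  | _ :: y :: xs => y :: takeOdd xs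

theorem map_getD_odd {α : Type} (xs : List α) (d : α) :
    (List.range (xs.length / 2)).map (fun k => xs.getD (2 * k + 1) d) = takeOdd xs := by
  induction xs using takeOdd.induct with
  | case1 => simp [takeOdd]
  | case2 x => simp [takeOdd]
  | case3 x y xs ih =>
    have h : (x :: y :: xs).length / 2 = xs.length / 2 + 1 := by
      simp; omega
    rw [h, List.range_succ_eq_map, List.map_cons, List.map_map]
    simp only [takeOdd, List.cons.injEq]
    refine ⟨rfl, ?_⟩
    rw [← ih]
    apply List.map_congr_left
    intro i _
    have h2 : 2 * (i + 1) + 1 = (2 * i + 1) + 2 := by ring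
    show (x :: y :: xs).getD (2 * (i + 1) + 1) d = xs.getD (2 * i + 1) d
    rw [h2]; rfl

theorem slice2_odd {α : Type} (xs : List α) (d : α) :
    PySem.List.slice? xs (some 1) none 2 = some (takeOdd xs) := by
  rw [← map_getD_odd xs d]
  simp only [PySem.List.slice?, PySem.List.sliceIndices]
  norm_num
  rcases Nat.eq_zero_or_pos xs.length with h0 | hpos
  · simp [h0]
  · have hmin : min 1 (xs.length:Int) = 1 := by omega
    rw [hmin]
    have hc : ((if 1 < xs.length then (((xs.length:Int) - 1 + 2 - 1)/2).toNat else 0))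
        = xs.length / 2 := by split <;> omega
    rw [hc]
    rw [List.filterMap_congr (g := fun k => some (xs[2*k+1]?.getD d)) ?_]
    · simp
    intro k hk
    simp only [List.mem_range] at hk
    have hlt : 2 * k + 1 < xs.length := by omega
    rw [show ((1 + 2 * (k:Int)).toNat) = 2 * k + 1 by omega]
    simp [List.getElem?_eq_getElem hlt]

theorem rev_map_range {α : Type} (f : Nat → α) (n : Nat) :
    ((List.range n).map f).reverse = (List.range n).map (fun i => f (n - 1 - i)) := by
  induction n with
  | zero => simp
  | succ n ih =>
    conv_lhs => rw [List.range_succ]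
    conv_rhs => rw [List.range_succ_eq_map]
    simp [List.map_map, ih, Nat.sub_sub, Nat.add_comm]

theorem truncdiv_two (n : Nat) : PySem.Int.truncdiv (n:Int) 2 = ((n/2 : Nat) : Int) := by
  simp [PySem.Int.truncdiv]

theorem loop1_eq (m : Nat) (c : Int) :
    (List.range m).foldl (fun (st : List Int × Int) _ => (st.1 ++ [st.2], st.2 - 2)) ([], c)
      = ((List.range m).map (fun i : Nat => c - 2 * (i:Int)), c - 2 * (m:Int)) := by
  induction m with
  | zero => simp
  | succ n ih =>
    rw [List.range_succ, List.foldl_append, ih, List.map_append]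
    simp only [List.foldl_cons, List.foldl_nil, List.map_cons, List.map_nil, Prod.mk.injEq]
    exact ⟨trivial, by push_cast; ring⟩

theorem map_range_getD_self {α : Type} (l : List α) (d : α) :
    (List.range l.length).map (fun k => l.getD k d) = l := by
  apply List.ext_getElem
  · simp
  · intro i h1 h2
    simp [List.getElem?_eq_getElem h2]


theorem ordre_eq (n : Nat) (c0 : Int) :
    (PySem.List.pyRange 1 ((n:Int) + 1) 2).foldl (fun acc g => acc ++ [g])
      (((PySem.List.pyRange 0 (((n/2 : Nat)) : Int) 1).foldl
        (fun (st : List Int × Int) _ => (st.1 ++ [st.2], st.2 - 2)) ([], c0)).1)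
    = (List.range (n/2)).map (fun i : Nat => c0 - 2 * (i:Int))
      ++ (List.range ((n+1)/2)).map (fun k : Nat => 1 + 2 * (k:Int)) := by
  rw [PySem.List.pyRange_zero, List.foldl_map, Int.toNat_natCast, loop1_eq,
    PySem.List.foldl_append_singleton]
  congr 1
  rw [PySem.List.pyRange_of_pos 1 ((n:Int)+1) (by norm_num)]
  congr 1
  rw [show ((if (1:Int) < (n:Int) + 1 then (((n:Int) + 1 - 1 + 2 - 1) / 2).toNat else 0))
      = (n+1)/2 from by split <;> omega]

theorem motcode_eq (l : List Char) (ordre : List Int) (hlen : ordre.length = l.length) :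
    (PySem.List.pyRange 0 (l.length:Int) 1).foldl
      (fun acc k => acc ++ [PySem.List.pyGetD l (PySem.List.pyGetD ordre k 0 - 1) ' ']) []
    = ordre.map (fun o => PySem.List.pyGetD l (o - 1) ' ') := by
  rw [PySem.List.pyRange_zero, Int.toNat_natCast, List.foldl_map,
    PySem.List.foldl_append_singleton_eq_map, List.nil_append]
  rw [← hlen]
  rw [show (fun k : Nat => PySem.List.pyGetD l (PySem.List.pyGetD ordre (k:Int) 0 - 1) ' ')
      = (fun k : Nat => (fun o : Int => PySem.List.pyGetD l (o - 1) ' ') (ordre.getD k 0)) from by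
    funext k; rw [PySem.List.pyGetD_natCast]]
  rw [show (fun k : Nat => (fun o : Int => PySem.List.pyGetD l (o - 1) ' ') (ordre.getD k 0))
      = (fun o : Int => PySem.List.pyGetD l (o - 1) ' ') ∘ (fun k : Nat => ordre.getD k 0) from rfl]
  rw [← List.map_map, map_range_getD_self]

theorem monge1_eq (mot : String) :
    monge1 mot = String.ofList ((takeOdd mot.toList).reverse ++ takeEven mot.toList) := by
  have key : ∀ (l : List Char) (c0 : Int), c0 = (l.length:Int) - ((l.length % 2 : Nat) : Int) →
      ((List.range (l.length/2)).map (fun i : Nat => c0 - 2 * (i:Int))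
        ++ (List.range ((l.length+1)/2)).map (fun k : Nat => 1 + 2 * (k:Int))).map
          (fun o => PySem.List.pyGetD l (o - 1) ' ')
      = (takeOdd l).reverse ++ takeEven l := by
    intro l c0 hc0
    rw [List.map_append]
    congr 1
    · rw [List.map_map]
      rw [List.map_congr_left (g := fun i : Nat => l.getD (2 * (l.length/2 - 1 - i) + 1) ' ') ?_]
      · rw [← rev_map_range (fun j : Nat => l.getD (2 * j + 1) ' ') (l.length/2),
          map_getD_odd]
      · intro i hi
        simp only [List.mem_range] at hi
        simp only [Function.comp]
        rw [show c0 - 2 * (i:Int) - 1 = ((2 * (l.length/2 - 1 - i) + 1 : Nat) : Int) from by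
          push_cast [Nat.sub_sub]; omega]
        rw [PySem.List.pyGetD_natCast]
    · rw [List.map_map]
      rw [List.map_congr_left (g := fun k : Nat => l.getD (2 * k) ' ') ?_]
      · rw [map_getD_even]
      · intro k _
        simp only [Function.comp]
        rw [show (1:Int) + 2 * (k:Int) - 1 = ((2 * k : Nat) : Int) from by push_cast; ring]
        rw [PySem.List.pyGetD_natCast]
  have hmod : PySem.Int.mod (mot.toList.length : Int) 2 = ((mot.toList.length % 2 : Nat) : Int) := by
    exact_mod_cast PySem.Int.mod_natCast mot.toList.length 2
  have hlen : ∀ c0 : Int,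
      ((List.range (mot.toList.length/2)).map (fun i : Nat => c0 - 2 * (i:Int))
        ++ (List.range ((mot.toList.length+1)/2)).map (fun k : Nat => 1 + 2 * (k:Int))).length
      = mot.toList.length := by
    intro c0; simp; omega
  unfold monge1
  simp only [truncdiv_two, hmod]
  by_cases hpar : mot.toList.length % 2 = 1
  · simp only [hpar, Nat.cast_one, if_true]
    rw [ordre_eq, motcode_eq _ _ (hlen _), key]
    push_cast [hpar]; ring
  · have h0 : mot.toList.length % 2 = 0 := by omega
    have hne : ¬((0:Int) = 1) := by norm_num
    simp only [h0, Nat.cast_zero, hne, if_false]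
    rw [ordre_eq, motcode_eq _ _ (hlen _), key]
    push_cast [h0]; ring

-- ===== VERDICT (by name: the statement is the Claim_ definition above) =====
theorem monge1_spec : Claim_equal_monge1 := by
  intro mot _
  unfold Spec_monge1
  rw [monge1_eq]
  show _ = String.ofList
    (((PySem.List.slice? ((PySem.List.slice? mot.toList (some 1) none 2).getD []) none none (-1)).getD [])
      ++ (PySem.List.slice? mot.toList (some 0) none 2).getD [])
  rw [slice2_even mot.toList ' ', slice2_odd mot.toList ' ']
  simp [PySem.List.slice?_none_none_neg_one]
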